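-- pv_equiv track=rewrite | github.com/waheeb71/mypro | modules/waf/engine/core/analysis/feature_extractor.py | _keyword_count
-- ===== SOURCE A (Python) =====
-- def _keyword_count(text_lower: str, keyword_set: frozenset) -> int:
--     """Count occurrences of keywords in a lowercased text."""
--     count = 0
--     for kw in keyword_set:
--         # Use word-boundary-aware search for short keywords
--         start = 0
--         while True:
--             idx = text_lower.find(kw, start)
--             if idx == -1:
--                 break
--             count += 1
--             start = idx + len(kw)
--     return count
-- ===== SOURCE B (Python) =====
-- def _keyword_count(text_lower: str, keyword_set: frozenset) -> int:
--     """Count occurrences of keywords in a lowercased text."""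
--     # One left-to-right sweep over the text positions: at each position, every
--     # keyword whose next allowed start has been reached and which matches here
--     # is counted and its next allowed start jumps past the match (greedy
--     # non-overlapping, same matches as repeated str.find from the left).
--     # A cheap first-character comparison filters entries before the full
--     # prefix test.
--     count = 0
--     state = [[kw, 0] for kw in keyword_set]
--     startswith = text_lower.startswith
--     for i in range(len(text_lower)):
--         c = text_lower[i]
--         for entry in state:
--             kw = entry[0]
--             if entry[1] <= i and kw[:1] == c and startswith(kw, i):
--                 count += 1
--                 entry[1] = i + len(kw)
--     return count
-- ===== Notes on version B (the rewrite author's own statement) =====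
-- stated objective: alternative
-- what changed: Replaces A's per-keyword find/advance loops over the whole text by a single left-to-right sweep over text positions that checks every keyword at each position (cheap first-character filter, then full prefix test) and keeps a next-allowed-start per keyword, yielding the same greedy non-overlapping matches; Pre_ excludes an empty-string keyword, on which A's find loop never advances and loops forever while B returns normally.
import Mathlib
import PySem

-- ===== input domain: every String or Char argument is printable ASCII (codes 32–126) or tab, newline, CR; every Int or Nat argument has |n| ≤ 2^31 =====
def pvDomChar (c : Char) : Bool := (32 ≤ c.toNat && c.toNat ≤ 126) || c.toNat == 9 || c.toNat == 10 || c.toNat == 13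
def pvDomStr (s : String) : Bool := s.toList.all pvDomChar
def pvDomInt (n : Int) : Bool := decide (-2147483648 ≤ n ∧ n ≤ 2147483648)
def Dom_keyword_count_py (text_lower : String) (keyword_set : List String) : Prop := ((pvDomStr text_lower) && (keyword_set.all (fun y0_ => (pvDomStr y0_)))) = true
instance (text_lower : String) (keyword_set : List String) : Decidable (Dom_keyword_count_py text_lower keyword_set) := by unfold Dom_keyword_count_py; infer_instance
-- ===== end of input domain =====

-- B replaces A's per-keyword find/advance loops by a single left-to-right sweep over text
-- positions with a next-allowed-start kept per keyword (alternative traversal, same cost).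


-- ===== PORT A =====
-- A's inner 'while True: idx = text_lower.find(kw, start); if idx == -1: break;
-- count += 1; start = idx + len(kw)' loop.  The fuel argument only totalizes the
-- recursion (the Python loop terminates iff kw ≠ ''; with fuel |text|+1 the base
-- case is unreachable for kw ≠ '', see lemma kwLoop_eq below).  idx.toNat is exact:
-- in the taken branch idx ≥ start ≥ 0.
def kwLoop (t kw : List Char) : Nat → Nat → Int → Int
  | 0, _, acc => acc
  | fuel + 1, start, acc =>
    let idx := PySem.Chars.findFrom t kw (start : Int) none
    if idx = -1 then acc
    else kwLoop t kw fuel (idx.toNat + kw.length) (acc + 1)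

def keyword_count_py (text_lower : String) (keyword_set : List String) : Int :=
  keyword_set.foldl
    (fun count kw => kwLoop text_lower.toList kw.toList (text_lower.toList.length + 1) 0 count)
    0

-- ===== PORT B =====
-- the inner 'for entry in state:' loop of one position i: returns (count delta, new state).
-- 'kw[:1] == c' (c = text_lower[i]) is 'kw.toList.take 1 = (t.drop i).take 1' and
-- 'text_lower.startswith(kw, i)' is exactly 'kw is a prefix of text_lower[i:]'
-- since 0 ≤ i < len(text_lower) here.
def innerSweep (t : List Char) (i : Nat) : List (String × Nat) → Int × List (String × Nat)
  | [] => (0, [])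
  | (kw, nx) :: rest =>
    if nx ≤ i ∧ kw.toList.take 1 = (t.drop i).take 1 ∧ kw.toList.isPrefixOf (t.drop i) then
      let r := innerSweep t i rest
      (r.1 + 1, (kw, i + kw.toList.length) :: r.2)
    else
      let r := innerSweep t i rest
      (r.1, (kw, nx) :: r.2)

-- 'for i in range(len(text_lower)):' over the state [[kw, 0] for kw in keyword_set]
def keyword_count_py_alt (text_lower : String) (keyword_set : List String) : Int :=
  let t := text_lower.toList
  ((List.range t.length).foldl
      (fun acc i => let r := innerSweep t i acc.2; (acc.1 + r.1, r.2))
      (0, keyword_set.map (fun kw => (kw, 0)))).1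

-- ===== PRECONDITION & SPEC =====
-- Pre_ excludes an empty-string keyword: there A's find-loop never advances (find('', start)
-- returns start) and loops forever, so A returns no value; B returns normally.
def Pre_keyword_count_py (text_lower : String) (keyword_set : List String) : Prop :=
  ∀ kw ∈ keyword_set, kw ≠ ""
instance (text_lower : String) (keyword_set : List String) : Decidable (Pre_keyword_count_py text_lower keyword_set) := by unfold Pre_keyword_count_py; infer_instance
def pvWitness_keyword_count_py : String × List String := ("select 1 or 1=1 -- select", ["select", "or", "union"])

def Spec_keyword_count_py (text_lower : String) (keyword_set : List String) (out : Int) : Prop := out = keyword_count_py_alt text_lower keyword_set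
instance (text_lower : String) (keyword_set : List String) (out : Int) : Decidable (Spec_keyword_count_py text_lower keyword_set out) := by unfold Spec_keyword_count_py; infer_instance

-- ===== CLAIM (what is proved, stated in full; the proofs are below) =====
def Claim_equal_keyword_count_py : Prop := ∀ (text_lower : String) (keyword_set : List String), Dom_keyword_count_py text_lower keyword_set → Pre_keyword_count_py text_lower keyword_set → Spec_keyword_count_py text_lower keyword_set (keyword_count_py text_lower keyword_set)

-- ===== LEMMAS AND PROOFS =====

-- the accumulator of PySem.Chars.count.go is additive
theorem go_acc (sub : List Char) (fuel : Nat) (l : List Char) (acc : Nat) :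
    PySem.Chars.count.go sub fuel l acc = acc + PySem.Chars.count.go sub fuel l 0 := by
  induction fuel generalizing l acc with
  | zero => simp [PySem.Chars.count.go]
  | succ n ih =>
    cases l with
    | nil => simp [PySem.Chars.count.go]
    | cons h t =>
      simp only [PySem.Chars.count.go]
      split
      · rw [ih _ (acc+1), ih _ 1]; omega
      · exact ih _ _

-- count.go does not depend on the fuel once fuel ≥ length (for sub ≠ [])
theorem go_fuel (sub : List Char) (hsub : sub ≠ []) :
    ∀ (fuel fuel' : Nat) (l : List Char) (acc : Nat), l.length ≤ fuel → l.length ≤ fuel' →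
      PySem.Chars.count.go sub fuel l acc = PySem.Chars.count.go sub fuel' l acc := by
  intro fuel
  induction fuel using Nat.strong_induction_on with
  | _ fuel ih =>
    intro fuel' l acc h h'
    cases l with
    | nil => cases fuel <;> cases fuel' <;> simp [PySem.Chars.count.go]
    | cons c t =>
      simp only [List.length_cons] at h h'
      obtain ⟨f, rfl⟩ : ∃ f, fuel = f + 1 := ⟨fuel - 1, by omega⟩
      obtain ⟨f', rfl⟩ : ∃ f', fuel' = f' + 1 := ⟨fuel' - 1, by omega⟩
      simp only [PySem.Chars.count.go]
      split
      · rename_i hp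
        have hlen : sub.length ≤ (c :: t).length := (List.isPrefixOf_iff_prefix.mp hp).length_le
        have h1 : 0 < sub.length := List.length_pos_of_ne_nil hsub
        have hd : (List.drop sub.length (c :: t)).length = (c :: t).length - sub.length := by simp
        rw [ih f (by omega) f' _ _ (by simp at hd ⊢; omega) (by simp; omega)]
      · rw [ih f (by omega) f' _ _ (by omega) (by omega)]

theorem go_nil (sub : List Char) (fuel : Nat) (acc : Nat) :
    PySem.Chars.count.go sub fuel [] acc = acc := by
  cases fuel <;> simp [PySem.Chars.count.go]

theorem infix_of_prefix_drop {sub l : List Char} {m : Nat} (h : sub <+: l.drop m) :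
    sub <:+: l := by
  obtain ⟨r, hr⟩ := h
  exact ⟨l.take m, r, by rw [List.append_assoc, hr, List.take_append_drop]⟩

-- uniqueness characterisation of Python's str.find
theorem find_eq_of (sub l : List Char) (m : Nat) (h1 : sub <+: l.drop m)
    (h2 : ∀ i < m, ¬ sub <+: l.drop i) : PySem.Chars.find l sub = m := by
  have hnn : 0 ≤ PySem.Chars.find l sub :=
    (PySem.Chars.find_nonneg_iff l sub).mpr (infix_of_prefix_drop h1)
  obtain ⟨hpre, hmin⟩ := PySem.Chars.find_spec hnn
  have : (PySem.Chars.find l sub).toNat = m := by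
    rcases Nat.lt_trichotomy (PySem.Chars.find l sub).toNat m with h | h | h
    · exact absurd hpre (h2 _ h)
    · exact h
    · exact absurd h1 (hmin m h)
  omega

-- count.go normalized to fuel = length: the greedy non-overlapping count
def goN (sub l : List Char) : Nat := PySem.Chars.count.go sub l.length l 0

-- first-occurrence recurrence for the greedy non-overlapping scan
theorem goN_rec (sub : List Char) (hsub : sub ≠ []) (l : List Char) :
    goN sub l =
      if PySem.Chars.find l sub = -1 then 0
      else 1 + goN sub (l.drop ((PySem.Chars.find l sub).toNat + sub.length)) := by
  have hs1 : 0 < sub.length := List.length_pos_of_ne_nil hsub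
  induction l with
  | nil =>
    have hne : PySem.Chars.find [] sub = -1 := by
      rw [PySem.Chars.find_eq_neg_one_iff]
      intro hinf
      have hlen := hinf.length_le
      simp only [List.length_nil, Nat.le_zero] at hlen
      omega
    simp [goN, PySem.Chars.count.go, hne]
  | cons c t ih =>
    by_cases hp : sub <+: (c :: t)
    · have hf : PySem.Chars.find (c :: t) sub = 0 :=
        find_eq_of sub (c :: t) 0 (by simpa using hp) (fun i hi => absurd hi (Nat.not_lt_zero i))
      rw [hf]
      have hstep : goN sub (c :: t) = PySem.Chars.count.go sub t.length (List.drop sub.length (c :: t)) 1 := by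
        simp only [goN, List.length_cons, PySem.Chars.count.go, List.isPrefixOf_iff_prefix.mpr hp]
        simp
      rw [hstep, go_acc]
      have hdl : (List.drop sub.length (c :: t)).length ≤ t.length := by simp; omega
      rw [go_fuel sub hsub t.length (List.drop sub.length (c :: t)).length _ 0 hdl le_rfl]
      simp [goN]
    · have hstep : goN sub (c :: t) = goN sub t := by
        have : ¬ sub.isPrefixOf (c :: t) = true := by
          rw [List.isPrefixOf_iff_prefix]; exact hp
        simp only [goN, List.length_cons, PySem.Chars.count.go]
        rw [if_neg this]
      by_cases hft : PySem.Chars.find t sub = -1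
      · have hfl : PySem.Chars.find (c :: t) sub = -1 := by
          rw [PySem.Chars.find_eq_neg_one_iff] at hft ⊢
          intro hinf
          obtain ⟨pre, suf, hps⟩ := hinf
          cases pre with
          | nil => exact hp ⟨suf, by simpa using hps⟩
          | cons x xs =>
            have h2 : xs ++ (sub ++ suf) = t := (by simpa using hps : _ ∧ _).2
            exact hft ⟨xs, suf, by simpa using h2⟩
        rw [hstep, ih, if_pos hft, if_pos hfl]
      · have hnn : 0 ≤ PySem.Chars.find t sub := by
          have := PySem.Chars.neg_one_le_find t sub
          omega
        set j := (PySem.Chars.find t sub).toNat with hj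
        obtain ⟨hpre, hmin⟩ := PySem.Chars.find_spec hnn
        have hfl : PySem.Chars.find (c :: t) sub = (j + 1 : Nat) := by
          apply find_eq_of
          · simpa using hpre
          · intro i hi
            cases i with
            | zero => simpa using hp
            | succ i' => intro hpre'; exact hmin i' (by omega) (by simpa using hpre')
        rw [hstep, ih, if_neg hft, hfl]
        have : ((j + 1 : Nat) : Int) ≠ -1 := by omega
        rw [if_neg this]
        have hdrop : List.drop (((j + 1 : Nat) : Int).toNat + sub.length) (c :: t) = List.drop (j + sub.length) t := by
          rw [Int.toNat_natCast, show j + 1 + sub.length = (j + sub.length) + 1 from by omega, List.drop_succ_cons]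
        rw [hdrop]

-- A's find-jumping loop computes the greedy scan
theorem kwLoop_eq (t kw : List Char) (hkw : kw ≠ []) :
    ∀ (fuel k : Nat) (acc : Int), k ≤ t.length → t.length - k < fuel →
      kwLoop t kw fuel k acc = acc + (goN kw (t.drop k) : Int) := by
  intro fuel
  induction fuel with
  | zero => intro k acc h1 h2; omega
  | succ f ih =>
    intro k acc hk hf
    have hkw1 : 0 < kw.length := List.length_pos_of_ne_nil hkw
    have hff := PySem.Chars.findFrom_natCast t kw k hk
    simp only [kwLoop, hff]
    by_cases hfind : PySem.Chars.find (List.drop k t) kw = -1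
    · rw [if_pos hfind, if_pos rfl]
      rw [goN_rec kw hkw, if_pos hfind]
      simp
    · rw [if_neg hfind]
      have hnn : 0 ≤ PySem.Chars.find (List.drop k t) kw := by
        have := PySem.Chars.neg_one_le_find (List.drop k t) kw
        omega
      set j := (PySem.Chars.find (List.drop k t) kw).toNat with hj
      have hjmax : j + kw.length ≤ t.length - k := by
        obtain ⟨hpre, _⟩ := PySem.Chars.find_spec hnn
        have := hpre.length_le
        simp at this
        omega
      have hne : ¬ ((k : Int) + PySem.Chars.find (List.drop k t) kw = -1) := by omega
      rw [if_neg hne]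
      have htn : ((k : Int) + PySem.Chars.find (List.drop k t) kw).toNat = k + j := by omega
      rw [htn]
      rw [ih (k + j + kw.length) (acc + 1) (by omega) (by omega)]
      rw [goN_rec kw hkw (List.drop k t), if_neg hfind, ← hj, List.drop_drop]
      push_cast
      ring_nf

-- the outer per-keyword fold of A accumulates the per-keyword greedy counts
theorem foldl_kwLoop (t : List Char) :
    ∀ (ks : List String), (∀ kw ∈ ks, kw ≠ "") → ∀ (a : Int),
      ks.foldl (fun count kw => kwLoop t kw.toList (t.length + 1) 0 count) a
        = a + (ks.map (fun kw => (goN kw.toList t : Int))).sum := by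
  intro ks
  induction ks with
  | nil => intro _ a; simp
  | cons kw rest ih =>
    intro hpre a
    have hkw : kw.toList ≠ [] := by
      intro h
      exact hpre kw (by simp) (by rwa [show ([] : List Char) = "".toList from rfl, String.toList_inj] at h)
    simp only [List.foldl_cons, List.map_cons, List.sum_cons]
    rw [ih (fun k hk => hpre k (by simp [hk])) _]
    rw [kwLoop_eq t kw.toList hkw (t.length + 1) 0 a (by omega) (by omega)]
    simp
    ring

-- ── B side ──────────────────────────────────────────────────────────────────
-- the fate of ONE keyword entry under the position sweep: (matches counted, final next-start)
def ent (t : List Char) (kw : String) : List Nat → Nat → Int × Nat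
  | [], nx => (0, nx)
  | i :: is, nx =>
    if nx ≤ i ∧ kw.toList.take 1 = (t.drop i).take 1 ∧ kw.toList.isPrefixOf (t.drop i) then
      let r := ent t kw is (i + kw.toList.length)
      (r.1 + 1, r.2)
    else ent t kw is nx

-- the sweep's count accumulator is additive
theorem sweep_acc (t : List Char) (is : List Nat) :
    ∀ (c d : Int) (s : List (String × Nat)),
      is.foldl (fun acc i => let r := innerSweep t i acc.2; (acc.1 + r.1, r.2)) (c + d, s)
        = ((is.foldl (fun acc i => let r := innerSweep t i acc.2; (acc.1 + r.1, r.2)) (c, s)).1 + d,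
           (is.foldl (fun acc i => let r := innerSweep t i acc.2; (acc.1 + r.1, r.2)) (c, s)).2) := by
  induction is with
  | nil => intro c d s; rfl
  | cons i is ih =>
    intro c d s
    simp only [List.foldl_cons]
    rw [show c + d + (innerSweep t i s).1 = (c + (innerSweep t i s).1) + d from by ring]
    exact ih _ _ _
-- with no entries left the sweep does nothing
theorem sweep_nil (t : List Char) (is : List Nat) :
    ∀ (c : Int),
      is.foldl (fun acc i => let r := innerSweep t i acc.2; (acc.1 + r.1, r.2)) (c, [])
        = (c, []) := by
  induction is with
  | nil => intro c; rfl
  | cons i is ih => intro c; simp only [List.foldl_cons, innerSweep]; simpa using ih c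

-- exchange: the head entry contributes independently of the rest of the state
theorem sweep_exchange (t : List Char) (is : List Nat) :
    ∀ (c : Int) (kw : String) (nx : Nat) (s : List (String × Nat)),
      is.foldl (fun acc i => let r := innerSweep t i acc.2; (acc.1 + r.1, r.2)) (c, (kw, nx) :: s)
        = ((is.foldl (fun acc i => let r := innerSweep t i acc.2; (acc.1 + r.1, r.2)) (c, s)).1 + (ent t kw is nx).1,
           (kw, (ent t kw is nx).2) :: (is.foldl (fun acc i => let r := innerSweep t i acc.2; (acc.1 + r.1, r.2)) (c, s)).2) := by
  induction is with
  | nil => intro c kw nx s; simp [ent]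
  | cons i is ih =>
    intro c kw nx s
    simp only [List.foldl_cons, innerSweep, ent]
    split
    · rename_i hcond
      simp only
      rw [show c + ((innerSweep t i s).1 + 1) = (c + (innerSweep t i s).1) + 1 from by ring]
      rw [sweep_acc, ih]
      simp only
      rw [add_assoc]
    · simp only
      exact ih _ _ _ _

-- the whole sweep = sum of per-entry counts
theorem sweep_sum (t : List Char) (is : List Nat) :
    ∀ (ks : List String),
      (is.foldl (fun acc i => let r := innerSweep t i acc.2; (acc.1 + r.1, r.2))
        (0, ks.map (fun kw => (kw, 0)))).1
        = (ks.map (fun kw => (ent t kw is 0).1)).sum := by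
  intro ks
  induction ks with
  | nil => simp [sweep_nil]
  | cons kw rest ih =>
    simp only [List.map_cons, List.sum_cons, sweep_exchange]
    rw [ih]
    ring

-- a nonempty prefix pins down the first character
theorem take1_of_prefix {kw l : List Char} (hkw : kw ≠ []) (h : kw.isPrefixOf l = true) :
    kw.take 1 = l.take 1 := by
  cases kw with
  | nil => exact absurd rfl hkw
  | cons a as =>
    cases l with
    | nil => simp [List.isPrefixOf] at h
    | cons b bs =>
      simp only [List.isPrefixOf, Bool.and_eq_true, beq_iff_eq] at h
      simp [h.1]

-- one entry's sweep over the remaining positions equals the greedy count of the suffix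
theorem ent_go (t : List Char) (kw : String) (hkw : kw.toList ≠ []) :
    ∀ (k m nx : Nat), m + k = t.length →
      (ent t kw (List.range' m k) nx).1
        = (PySem.Chars.count.go kw.toList (t.length - max m nx) (t.drop (max m nx)) 0 : Int) := by
  have hk1 : 0 < kw.toList.length := List.length_pos_of_ne_nil hkw
  intro k
  induction k with
  | zero =>
    intro m nx hm
    have : t.length ≤ max m nx := by omega
    rw [List.drop_eq_nil_of_le (by omega)]
    simp [ent, go_nil]
  | succ k ih =>
    intro m nx hm
    rw [List.range'_succ]
    simp only [ent]
    by_cases hcond : nx ≤ m ∧ kw.toList.isPrefixOf (t.drop m)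
    · obtain ⟨hnx, hpref⟩ := hcond
      rw [if_pos ⟨hnx, take1_of_prefix hkw hpref, hpref⟩]
      have hmax : max m nx = m := by omega
      have hplen : kw.toList.length ≤ t.length - m := by
        have := (List.isPrefixOf_iff_prefix.mp hpref).length_le
        simpa using this
      have hmax2 : max (m + 1) (m + kw.toList.length) = m + kw.toList.length := by omega
      rw [ih (m + 1) (m + kw.toList.length) (by omega), hmax2]
      -- unfold one step of go on the right
      have hlen1 : t.length - m = (t.length - m - 1) + 1 := by omega
      rw [hmax, hlen1]
      obtain ⟨c, rest, hdrop⟩ : ∃ c rest, t.drop m = c :: rest := by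
        cases hd : t.drop m with
        | nil => exfalso; have := List.length_drop (l := t) (i := m); rw [hd] at this; simp at this; omega
        | cons c rest => exact ⟨c, rest, rfl⟩
      rw [hdrop]
      simp only [PySem.Chars.count.go]
      rw [if_pos (by rw [← hdrop]; exact hpref)]
      have hdd : List.drop kw.toList.length (c :: rest) = t.drop (m + kw.toList.length) := by
        rw [← hdrop, List.drop_drop]
      rw [hdd]
      have hfuel : (t.drop (m + kw.toList.length)).length ≤ t.length - m - 1 := by
        rw [List.length_drop]
        omega
      rw [go_fuel kw.toList hkw (t.length - m - 1) (t.length - (m + kw.toList.length))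
            (t.drop (m + kw.toList.length)) (0 + 1) hfuel (by simp)]
      rw [go_acc kw.toList (t.length - (m + kw.toList.length)) (t.drop (m + kw.toList.length)) (0 + 1)]
      push_cast
      ring
    · rw [if_neg (fun h => hcond ⟨h.1, h.2.2⟩)]
      by_cases hnx : nx ≤ m
      · -- no match at m: go steps one char
        have hpref : ¬ kw.toList.isPrefixOf (t.drop m) = true := fun h => hcond ⟨hnx, h⟩
        have hmax : max m nx = m := by omega
        have hmax2 : max (m + 1) nx = m + 1 := by omega
        rw [ih (m + 1) nx (by omega), hmax2, hmax]
        have hlen1 : t.length - m = (t.length - m - 1) + 1 := by omega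
        rw [hlen1]
        obtain ⟨c, rest, hdrop⟩ : ∃ c rest, t.drop m = c :: rest := by
          cases hd : t.drop m with
          | nil => exfalso; have := List.length_drop (l := t) (i := m); rw [hd] at this; simp at this; omega
          | cons c rest => exact ⟨c, rest, rfl⟩
        rw [hdrop]
        simp only [PySem.Chars.count.go]
        rw [if_neg (by rw [← hdrop]; exact hpref)]
        have hrest : rest = t.drop (m + 1) := by
          have := congrArg List.tail hdrop
          simpa [List.tail_drop] using this.symm
        rw [hrest, Nat.sub_sub]
      · -- position m is skipped (nx > m)
        have hmax : max (m + 1) nx = max m nx := by omega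
        rw [ih (m + 1) nx (by omega), hmax]

-- ===== VERDICT (by name: the statement is the Claim_ definition above) =====
theorem keyword_count_py_spec : Claim_equal_keyword_count_py := by
  intro text_lower keyword_set _hdom hpre
  unfold Spec_keyword_count_py keyword_count_py keyword_count_py_alt
  rw [foldl_kwLoop text_lower.toList keyword_set hpre 0]
  simp only [zero_add]
  rw [sweep_sum]
  congr 1
  apply List.map_congr_left
  intro kw hkw
  have hkwne : kw.toList ≠ [] := by
    intro h
    exact hpre kw hkw (by rwa [show ([] : List Char) = "".toList from rfl, String.toList_inj] at h)
  rw [show List.range text_lower.toList.length = List.range' 0 text_lower.toList.length from by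
        rw [List.range_eq_range']]
  rw [ent_go text_lower.toList kw hkwne text_lower.toList.length 0 0 (by omega)]
  simp [goN]
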